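-- pv_equiv track=rewrite | github.com/danielsaad/AA-IFB-CC | programacao-dinamica/caminhos_bottom_up.py | build_dp_table
-- ===== SOURCE A (Python) =====
-- def build_dp_table(n:int):
--     dp_table = [ [0 for _ in range(n)] for _ in range(n) ]
--     for i in range(n):
--         dp_table[i][0]=1
--         dp_table[0][i]=1
--
--     for i in range(1,n):
--         for j in range(1,n):
--             dp_table[i][j] = dp_table[i-1][j] + dp_table[i][j-1]
--
--     return dp_table
-- ===== SOURCE B (Python) =====
-- def build_dp_table(n: int):
--     table = []
--     for i in range(n):
--         row = []
--         c = 1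
--         for j in range(n):
--             row.append(c)
--             c = c * (i + j + 1) // (j + 1)
--         table.append(row)
--     return table
-- ===== Notes on version B (the rewrite author's own statement) =====
-- stated objective: alternative
-- what changed: B builds each row independently from the closed-form binomial path count C(i+j,i) via the multiplicative recurrence c = c*(i+j+1)//(j+1), instead of seeding edges and accumulating Pascal's recurrence from the left/top neighbours over a mutable table.
import Mathlib
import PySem

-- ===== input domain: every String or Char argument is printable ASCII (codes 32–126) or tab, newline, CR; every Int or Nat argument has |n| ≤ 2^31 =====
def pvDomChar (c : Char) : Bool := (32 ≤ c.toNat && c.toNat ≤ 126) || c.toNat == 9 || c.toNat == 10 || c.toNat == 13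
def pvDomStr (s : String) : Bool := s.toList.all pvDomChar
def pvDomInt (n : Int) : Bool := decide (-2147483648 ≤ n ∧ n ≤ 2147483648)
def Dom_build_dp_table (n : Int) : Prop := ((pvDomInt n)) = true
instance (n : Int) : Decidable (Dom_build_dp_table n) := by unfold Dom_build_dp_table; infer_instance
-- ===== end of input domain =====

-- B replaces A's Pascal-recurrence accumulation over a mutable table by computing each
-- cell independently with the multiplicative binomial closed form C(i+j, i) (objective: alternative).

-- ===== PORT A =====
def build_dp_table (n : Int) : List (List Int) :=
  let dp0 := (PySem.List.pyRange 0 n 1).map (fun _ => (PySem.List.pyRange 0 n 1).map (fun _ => (0:Int)))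
  let dp1 := (PySem.List.pyRange 0 n 1).foldl (fun t i =>
      let t1 := PySem.List.pySetD t i (PySem.List.pySetD (PySem.List.pyGetD t i []) 0 1)
      PySem.List.pySetD t1 0 (PySem.List.pySetD (PySem.List.pyGetD t1 0 []) i 1)) dp0
  (PySem.List.pyRange 1 n 1).foldl (fun t i =>
    (PySem.List.pyRange 1 n 1).foldl (fun t j =>
      PySem.List.pySetD t i (PySem.List.pySetD (PySem.List.pyGetD t i []) j
        (PySem.List.pyGetD (PySem.List.pyGetD t (i-1) []) j 0 +
         PySem.List.pyGetD (PySem.List.pyGetD t i []) (j-1) 0))) t) dp1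

-- ===== PORT B =====
-- Source B: each row built independently; c runs through the closed-form binomials C(i+j, i)
-- via the multiplicative recurrence c <- c * (i + j + 1) // (j + 1)
def build_dp_table_alt (n : Int) : List (List Int) :=
  (PySem.List.pyRange 0 n 1).foldl (fun table i =>
    table ++ [((PySem.List.pyRange 0 n 1).foldl (fun (p : List Int × Int) j =>
        (p.1 ++ [p.2], PySem.Int.floordiv (p.2 * (i + j + 1)) (j + 1))) ([], 1)).1]) []

-- ===== PRECONDITION & SPEC =====
def Spec_build_dp_table (n : Int) (out : List (List Int)) : Prop := out = build_dp_table_alt n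
instance (n : Int) (out : List (List Int)) : Decidable (Spec_build_dp_table n out) := by unfold Spec_build_dp_table; infer_instance

-- ===== CLAIM (what is proved, stated in full; the proofs are below) =====
def Claim_equal_build_dp_table : Prop := ∀ (n : Int), Dom_build_dp_table n → Spec_build_dp_table n (build_dp_table n)

-- ===== LEMMAS AND PROOFS =====

-- Nat-indexed forms of A's two loop bodies (edge seeding, Pascal cell update)
def stepEdge (t : List (List Int)) (i : Nat) : List (List Int) :=
  (t.set i ((t.getD i []).set 0 1)).set 0
    (((t.set i ((t.getD i []).set 0 1)).getD 0 []).set i 1)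

def stepCell (t : List (List Int)) (i j : Nat) : List (List Int) :=
  t.set i ((t.getD i []).set j ((t.getD (i-1) []).getD j 0 + (t.getD i []).getD (j-1) 0))

-- the table after k iterations of the edge-seeding loop
def tblE (N k : Nat) : List (List Int) :=
  (List.range N).map (fun r => (List.range N).map (fun j =>
    if (r = 0 ∧ j < k) ∨ (r < k ∧ j = 0) then (1:Int) else 0))

-- the table while the inner loop is filling row i (columns 1..m done)
def tblI (N i m : Nat) : List (List Int) :=
  (List.range N).map (fun r => (List.range N).map (fun j =>
    if r < i then ((r+j).choose r : Int)
    else if r = i then (if j ≤ m then ((r+j).choose r : Int) else if j = 0 then 1 else 0)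
    else if j = 0 then 1 else 0))

-- the table after the outer loop has finished rows 1..i
def tblM (N i : Nat) : List (List Int) :=
  (List.range N).map (fun r => (List.range N).map (fun j =>
    if r ≤ i then ((r+j).choose r : Int) else if j = 0 then 1 else 0))

theorem buildA_norm (n : Int) :
    build_dp_table n =
      (List.range (n-1).toNat).foldl (fun t k =>
        (List.range (n-1).toNat).foldl (fun t k' => stepCell t (k+1) (k'+1)) t)
        ((List.range n.toNat).foldl stepEdge
          ((List.range n.toNat).map (fun _ => (List.range n.toNat).map (fun _ => (0:Int))))) := by
  unfold build_dp_table stepEdge stepCell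
  rw [PySem.List.pyRange_one 0 n, PySem.List.pyRange_one 1 n]
  simp only [Int.sub_zero, List.foldl_map, List.map_map, zero_add]
  have h1 : ∀ k : Nat, (1 : Int) + (k : Int) = ((k+1 : Nat) : Int) := by intro k; push_cast; ring
  simp only [h1]
  have h2 : ∀ k : Nat, ((k+1 : Nat) : Int) - 1 = ((k : Nat) : Int) := by intro k; push_cast; ring
  have hs0 : ∀ (l : List (List Int)) (v : List Int), PySem.List.pySetD l 0 v = l.set 0 v := by
    intro l v; simpa using PySem.List.pySetD_natCast (xs := l) (n := 0) (v := v)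
  have hr0 : ∀ (l : List Int) (v : Int), PySem.List.pySetD l 0 v = l.set 0 v := by
    intro l v; simpa using PySem.List.pySetD_natCast (xs := l) (n := 0) (v := v)
  simp only [h2, PySem.List.pySetD_natCast, PySem.List.pyGetD_natCast, PySem.List.pyGetD_zero,
    hs0, hr0, Function.comp_def]
  norm_num

theorem rowFold (i m : Nat) :
    (List.range m).foldl (fun (p : List Int × Int) (j : Nat) =>
        (p.1 ++ [p.2], PySem.Int.floordiv (p.2 * ((i:Int) + (j:Int) + 1)) ((j:Int) + 1)))
      ([], 1)
    = ((List.range m).map (fun j => ((i+j).choose i : Int)), ((i+m).choose i : Int)) := by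
  induction m with
  | zero => simp
  | succ m ih =>
    rw [List.range_succ, List.foldl_append, ih, List.foldl_cons, List.foldl_nil]
    have hc1 : (i:Int) + (m:Int) + 1 = ((i+m+1 : Nat) : Int) := by push_cast; ring
    have hc2 : (m:Int) + 1 = ((m+1 : Nat) : Int) := by push_cast; ring
    rw [hc1, hc2, ← Nat.cast_mul, PySem.Int.floordiv_natCast]
    refine Prod.ext ?_ ?_
    · simp
    · show (((i+m).choose i * (i+m+1) / (m+1) : Nat) : Int) = (((i+(m+1)).choose i : Nat) : Int)
      congr 1
      rw [Nat.choose_symm_add, Nat.mul_comm,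
        Nat.add_one_mul_choose_eq (i+m) m, Nat.mul_div_cancel _ (Nat.succ_pos m)]
      rw [show i + m + 1 = i + (m+1) from rfl]
      exact (Nat.choose_symm_add).symm
  
theorem buildB_norm (n : Int) :
    build_dp_table_alt n =
      (List.range n.toNat).map (fun i => (List.range n.toNat).map (fun j => ((i+j).choose i : Int))) := by
  unfold build_dp_table_alt
  rw [PySem.List.pyRange_one]
  simp only [Int.sub_zero, List.foldl_map, zero_add]
  rw [PySem.List.foldl_append_singleton_eq_map]
  simp only [List.nil_append]
  apply List.map_congr_left
  intro i _
  rw [rowFold i n.toNat]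

theorem set_map_range {α : Type} (N r : Nat) (F : Nat → α) (v : α) :
    ((List.range N).map F).set r v = (List.range N).map (fun x => if x = r then v else F x) := by
  apply List.ext_getElem (by simp)
  intro i h1 h2
  simp only [List.getElem_set, List.getElem_map, List.getElem_range]
  by_cases h : r = i
  · rw [if_pos h, if_pos h.symm]
  · rw [if_neg h, if_neg (fun g => h g.symm)]

theorem edge_step (N k : Nat) (hk : k < N) : stepEdge (tblE N k) k = tblE N (k+1) := by
  unfold stepEdge tblE
  have hN : 0 < N := Nat.lt_of_le_of_lt (Nat.zero_le k) hk
  rw [PySem.List.getD_map_range _ _ _ _ hk, set_map_range,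
      PySem.List.getD_map_range _ _ _ _ hN, set_map_range]
  rw [apply_ite (fun l : List Int => l.set k 1), set_map_range, set_map_range, set_map_range]
  apply List.map_congr_left
  intro x hx
  simp only [List.mem_range] at hx
  split_ifs <;>
    (apply List.map_congr_left; intro j hj; simp only [List.mem_range] at hj;
     split_ifs <;> omega)

theorem edge_fold (N k : Nat) (hk : k ≤ N) :
    (List.range k).foldl stepEdge ((List.range N).map (fun _ => (List.range N).map (fun _ => (0:Int))))
      = tblE N k := by
  induction k with
  | zero => simp [tblE]
  | succ k ih =>
    rw [List.range_succ, List.foldl_append, ih (by omega), List.foldl_cons, List.foldl_nil,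
      edge_step N k (by omega)]

theorem pascal_int (i' m : Nat) :
    ((i'+(m+1)).choose i' : Int) + ((i'+1+m).choose (i'+1) : Int)
      = ((i'+1+(m+1)).choose (i'+1) : Int) := by
  have hN : (i'+1+(m+1)).choose (i'+1) = (i'+(m+1)).choose i' + (i'+1+m).choose (i'+1) := by
    rw [show i'+1+(m+1) = (i'+m+1)+1 from by omega, show i'+(m+1) = i'+m+1 from by omega,
        show i'+1+m = i'+m+1 from by omega]
    exact Nat.choose_succ_succ _ _
  rw [hN]; push_cast; ring

set_option maxHeartbeats 1000000 in
theorem inner_step (N i m : Nat) (h1 : 1 ≤ i) (hi : i < N) (hm : m + 1 < N) :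
    stepCell (tblI N i m) i (m+1) = tblI N i (m+1) := by
  obtain ⟨i', rfl⟩ : ∃ i', i = i' + 1 := ⟨i - 1, by omega⟩
  unfold stepCell tblI
  simp only [Nat.add_sub_cancel]
  rw [PySem.List.getD_map_range _ _ _ _ hi,
      PySem.List.getD_map_range _ _ _ _ (show i' < N by omega),
      PySem.List.getD_map_range _ _ _ _ hm,
      PySem.List.getD_map_range _ _ _ _ (show m < N by omega),
      set_map_range, set_map_range]
  apply List.ext_getElem (by simp)
  intro r hr _
  simp only [List.getElem_map, List.getElem_range]
  by_cases hxi : r = i' + 1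
  · subst hxi
    rw [if_pos rfl]
    apply List.map_congr_left
    intro j hj
    simp only [List.mem_range] at hj
    split_ifs <;> first | omega | (subst_vars; exact pascal_int i' m)
  · rw [if_neg hxi]
    apply List.map_congr_left
    intro j hj
    simp only [List.mem_range] at hj
    split_ifs <;> omega

theorem inner_fold (N i : Nat) (h1 : 1 ≤ i) (hi : i < N) (m : Nat) (hm : m ≤ N - 1) :
    (List.range m).foldl (fun t k => stepCell t i (k+1)) (tblI N i 0) = tblI N i m := by
  induction m with
  | zero => simp
  | succ m ih =>
    rw [List.range_succ, List.foldl_append, ih (by omega), List.foldl_cons, List.foldl_nil,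
      inner_step N i m h1 hi (by omega)]

theorem tblI_zero (N i : Nat) (h1 : 1 ≤ i) : tblI N i 0 = tblM N (i-1) := by
  unfold tblI tblM
  apply List.map_congr_left; intro x hx; simp only [List.mem_range] at hx
  apply List.map_congr_left; intro j hj; simp only [List.mem_range] at hj
  split_ifs <;> first | omega | simp_all

theorem tblI_last (N i : Nat) (_hi : i < N) : tblI N i (N-1) = tblM N i := by
  unfold tblI tblM
  apply List.map_congr_left; intro x hx; simp only [List.mem_range] at hx
  apply List.map_congr_left; intro j hj; simp only [List.mem_range] at hj
  split_ifs <;> omega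

theorem tblE_last (N : Nat) : tblE N N = tblM N 0 := by
  unfold tblE tblM
  apply List.map_congr_left; intro x hx; simp only [List.mem_range] at hx
  apply List.map_congr_left; intro j hj; simp only [List.mem_range] at hj
  split_ifs <;> first | omega | simp_all

theorem outer_fold (N : Nat) (m : Nat) (hm : m ≤ N - 1) :
    (List.range m).foldl (fun t k =>
        (List.range (N-1)).foldl (fun t k' => stepCell t (k+1) (k'+1)) t) (tblM N 0)
      = tblM N m := by
  induction m with
  | zero => simp
  | succ m ih =>
    rw [List.range_succ, List.foldl_append, ih (by omega), List.foldl_cons, List.foldl_nil]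
    have h1 : 1 ≤ m + 1 := by omega
    have hi : m + 1 < N := by omega
    rw [show tblM N m = tblI N (m+1) 0 by rw [tblI_zero N (m+1) h1]; simp,
        inner_fold N (m+1) h1 hi (N-1) le_rfl, tblI_last N (m+1) hi]

theorem tblM_full (N : Nat) :
    tblM N (N-1) = (List.range N).map (fun i => (List.range N).map (fun j => ((i+j).choose i : Int))) := by
  unfold tblM
  apply List.map_congr_left; intro x hx; simp only [List.mem_range] at hx
  apply List.map_congr_left; intro j hj; simp only [List.mem_range] at hj
  split_ifs <;> omega

-- ===== VERDICT (by name: the statement is the Claim_ definition above) =====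
theorem build_dp_table_spec : Claim_equal_build_dp_table := by
  intro n _
  unfold Spec_build_dp_table
  rw [buildA_norm, buildB_norm]
  by_cases hN : n.toNat = 0
  · have hn1 : (n-1).toNat = 0 := by omega
    simp [hN, hn1]
  · have hn1 : (n-1).toNat = n.toNat - 1 := by omega
    rw [hn1, edge_fold n.toNat n.toNat le_rfl, tblE_last,
        outer_fold n.toNat (n.toNat - 1) le_rfl, tblM_full]
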